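-- pv_equiv track=rewrite | github.com/Oscar270292/NTUCSIE_ML | ML_HW4/HW4Q11.py | phi_3_x
-- ===== SOURCE A (Python) =====
-- def phi_3_x(x):
--     d = len(x)
--     features = []
--
--     features.append(1)
--     features.extend(x)
--     for i in range(d):
--         for j in range(i, d):
--             features.append(x[i] * x[j])
--     for i in range(d):
--         for j in range(i, d):
--             for k in range(j, d):
--                 features.append(x[i] * x[j] * x[k])
--     return features
-- ===== SOURCE B (Python) =====
-- def phi_3_x(x):
--     d = len(x)
--     features = [1]
--
--     def emit(start, deg, acc):
--         if deg == 0: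
--             features.append(acc)
--             return
--         for t in range(start, d):
--             emit(t, deg - 1, acc * x[t])
--
--     for deg in (1, 2, 3):
--         emit(0, deg, 1)
--     return features
-- ===== Notes on version B (the rewrite author's own statement) =====
-- stated objective: alternative
-- what changed: Replaces the three hardcoded index-loop nests with one degree-parametrized depth-first recursion over start indices that carries the running product as an accumulator and emits each monomial at depth 0.
import Mathlib
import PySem

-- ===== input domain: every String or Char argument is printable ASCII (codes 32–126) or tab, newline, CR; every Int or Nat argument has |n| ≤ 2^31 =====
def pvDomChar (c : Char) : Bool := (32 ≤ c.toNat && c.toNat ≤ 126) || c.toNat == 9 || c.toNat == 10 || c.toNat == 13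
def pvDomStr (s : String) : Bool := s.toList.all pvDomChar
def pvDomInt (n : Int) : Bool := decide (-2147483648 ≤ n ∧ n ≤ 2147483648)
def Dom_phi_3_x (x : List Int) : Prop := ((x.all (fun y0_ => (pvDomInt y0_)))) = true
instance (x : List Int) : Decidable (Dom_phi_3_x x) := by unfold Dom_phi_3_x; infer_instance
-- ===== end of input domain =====

-- B replaces A's three hardcoded loop nests by one degree-parametrized pass over a recursive
-- combinations-with-replacement generator (same ordered output; alternative decomposition, no speed claim).

-- ===== PORT A =====
def phi_3_x (x : List Int) : List Int :=
  let d : Int := PySem.List.len x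
  let features : List Int := []
  let features := features ++ [1]
  let features := features ++ x
  let features := (PySem.List.pyRange 0 d 1).foldl (fun acc i =>
    (PySem.List.pyRange i d 1).foldl (fun acc j =>
      acc ++ [PySem.List.pyGetD x i 0 * PySem.List.pyGetD x j 0]) acc) features
  let features := (PySem.List.pyRange 0 d 1).foldl (fun acc i =>
    (PySem.List.pyRange i d 1).foldl (fun acc j =>
      (PySem.List.pyRange j d 1).foldl (fun acc k =>
        acc ++ [PySem.List.pyGetD x i 0 * PySem.List.pyGetD x j 0 * PySem.List.pyGetD x k 0]) acc) acc) features
  features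

-- ===== PORT B =====
-- emit(start, deg, acc): DFS over nondecreasing index tuples, carrying the running product;
-- the returned list is the sequence of values appended to `features` by that call
def pvEmit (x : List Int) : Nat → Nat → Int → List Int
  | _, 0, acc => [acc]
  | start, deg + 1, acc =>
    (List.range' start (x.length - start)).flatMap (fun t => pvEmit x t deg (acc * x.getD t 0))

def phi_3_x_alt (x : List Int) : List Int :=
  [1, 2, 3].foldl (fun features deg => features ++ pvEmit x 0 deg 1) [1]

-- ===== PRECONDITION & SPEC =====
def Spec_phi_3_x (x : List Int) (out : List Int) : Prop := out = phi_3_x_alt x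
instance (x : List Int) (out : List Int) : Decidable (Spec_phi_3_x x out) := by unfold Spec_phi_3_x; infer_instance

-- ===== CLAIM (what is proved, stated in full; the proofs are below) =====
def Claim_equal_phi_3_x : Prop := ∀ (x : List Int), Dom_phi_3_x x → Spec_phi_3_x x (phi_3_x x)

-- ===== LEMMAS AND PROOFS =====

-- suffix recursion: for each suffix a :: as of the list, emit G a (a :: as)
def sufRec (G : Int → List Int → List Int) : List Int → List Int
  | [] => []
  | a :: as => G a (a :: as) ++ sufRec G as

theorem getD_range_self (y : List Int) : (List.range y.length).map (fun k => y.getD k 0) = y := by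
  apply List.ext_getElem
  · simp
  · intro i h1 h2
    simp [List.getD_eq_getElem?_getD, List.getElem?_eq_getElem h2]

theorem getD_drop (y : List Int) (i k : Nat) : (y.drop i).getD k 0 = y.getD (i + k) 0 := by
  simp [List.getD_eq_getElem?_getD, List.getElem?_drop]

-- the index loop over all i < y.length, where the body depends only on y[i] and the suffix y[i:]
theorem flatMap_range_eq_sufRec (G : Int → List Int → List Int) :
    ∀ y : List Int,
      (List.range y.length).flatMap (fun i => G (y.getD i 0) (y.drop i)) = sufRec G y := by
  intro y
  induction y with
  | nil => simp [sufRec]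
  | cons a as ih =>
    rw [List.length_cons, List.range_succ_eq_map]
    simp only [List.flatMap_cons, List.flatMap_map, List.getD_cons_succ,
      List.getD_cons_zero, List.drop_succ_cons, List.drop_zero]
    rw [sufRec, ih]

-- one run of an inner loop 'for k in range(j, d): … x[j+k] …' is a map over the suffix x[j:]
theorem seg_inner (x : List Int) (A : Int) (j : Nat) :
    (List.range (x.length - j)).map (fun k => A * x.getD (j + k) 0) =
      (x.drop j).map (fun c => A * c) := by
  conv_rhs => rw [← getD_range_self (x.drop j)]
  rw [List.map_map, List.length_drop]
  exact List.map_congr_left (fun k _ => by simp [Function.comp])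

theorem seg3_mid (x : List Int) (A : Int) (i : Nat) :
    (List.range (x.length - i)).flatMap (fun j =>
        (List.range (x.length - (i + j))).map (fun k =>
          A * x.getD (i + j) 0 * x.getD (i + j + k) 0)) =
      sufRec (fun b t => t.map (fun c => A * b * c)) (x.drop i) := by
  rw [← flatMap_range_eq_sufRec (fun b t => t.map (fun c => A * b * c)) (x.drop i),
    List.length_drop]
  apply List.flatMap_congr
  intro j _
  rw [getD_drop, List.drop_drop]
  exact seg_inner x (A * x.getD (i + j) 0) (i + j)

-- A's pair segment, in Nat-indexed form, equals the suffix recursion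
theorem pairs_eq (x : List Int) :
    (List.range x.length).flatMap (fun i =>
        (List.range (x.length - i)).map (fun k => x.getD i 0 * x.getD (i + k) 0)) =
      sufRec (fun a s => s.map (fun c => a * c)) x := by
  rw [← flatMap_range_eq_sufRec (fun a s => s.map (fun c => a * c)) x]
  apply List.flatMap_congr
  intro i _
  exact seg_inner x (x.getD i 0) i

-- A's triple segment, in Nat-indexed form, equals the nested suffix recursion
theorem triples_eq (x : List Int) :
    (List.range x.length).flatMap (fun i =>
        (List.range (x.length - i)).flatMap (fun j =>
          (List.range (x.length - (i + j))).map (fun k =>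
            x.getD i 0 * x.getD (i + j) 0 * x.getD (i + j + k) 0))) =
      sufRec (fun a s => sufRec (fun b t => t.map (fun c => a * b * c)) s) x := by
  rw [← flatMap_range_eq_sufRec
    (fun a s => sufRec (fun b t => t.map (fun c => a * b * c)) s) x]
  apply List.flatMap_congr
  intro i _
  exact seg3_mid x (x.getD i 0) i

-- rewrite A's Int-valued pyRange/pyGetD loops into the Nat-indexed normal forms above
theorem phi_3_x_eq_segments (x : List Int) :
    phi_3_x x = 1 :: (x ++
      ((List.range x.length).flatMap (fun i =>
          (List.range (x.length - i)).map (fun k => x.getD i 0 * x.getD (i + k) 0)) ++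
        (List.range x.length).flatMap (fun i =>
          (List.range (x.length - i)).flatMap (fun j =>
            (List.range (x.length - (i + j))).map (fun k =>
              x.getD i 0 * x.getD (i + j) 0 * x.getD (i + j + k) 0))))) := by
  unfold phi_3_x
  simp only [PySem.List.len_eq, PySem.List.foldl_append_singleton_eq_map,
    PySem.List.foldl_append_eq_flatMap]
  simp only [PySem.List.pyRange_one, Int.sub_zero, Int.toNat_natCast, List.flatMap_map,
    List.map_map, Function.comp_def, Int.zero_add]
  simp only [← Nat.cast_add, Int.toNat_sub, PySem.List.pyGetD_natCast]
  simp [List.append_assoc]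

theorem sufRec_congr (G G' : Int → List Int → List Int)
    (h : ∀ a s, G a s = G' a s) : ∀ y : List Int, sufRec G y = sufRec G' y := by
  intro y
  induction y with
  | nil => rfl
  | cons a as ih => rw [sufRec, sufRec, h, ih]

theorem sufRec_singleton (f : Int → Int) (y : List Int) :
    sufRec (fun b _ => [f b]) y = y.map f := by
  induction y with
  | nil => rfl
  | cons a as ih => rw [sufRec, ih]; rfl

-- the loop 'for t in range(start, d)' whose body depends only on x[t] and the suffix x[t:]
theorem flatMap_range'_drop (x : List Int) (start : Nat) (H : Int → List Int → List Int) :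
    (List.range' start (x.length - start)).flatMap (fun t => H (x.getD t 0) (x.drop t)) =
      sufRec H (x.drop start) := by
  rw [List.range'_eq_map_range, List.flatMap_map]
  rw [← flatMap_range_eq_sufRec H (x.drop start), List.length_drop]
  apply List.flatMap_congr
  intro k _
  rw [getD_drop, List.drop_drop]

theorem emit_one (x : List Int) (start : Nat) (acc : Int) :
    pvEmit x start 1 acc = (x.drop start).map (fun c => acc * c) := by
  rw [pvEmit, ← sufRec_singleton (fun c => acc * c) (x.drop start)]
  exact flatMap_range'_drop x start (fun b _ => [acc * b])

theorem emit_two (x : List Int) (start : Nat) (acc : Int) :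
    pvEmit x start 2 acc =
      sufRec (fun b t => t.map (fun c => acc * b * c)) (x.drop start) := by
  rw [show (2 : Nat) = 1 + 1 from rfl, pvEmit]
  simp only [emit_one]
  exact flatMap_range'_drop x start (fun b s => s.map (fun c => acc * b * c))

theorem emit_three (x : List Int) (start : Nat) (acc : Int) :
    pvEmit x start 3 acc =
      sufRec (fun a s => sufRec (fun b t => t.map (fun c => acc * a * b * c)) s)
        (x.drop start) := by
  rw [show (3 : Nat) = 2 + 1 from rfl, pvEmit]
  simp only [emit_two]
  exact flatMap_range'_drop x start
    (fun a s => sufRec (fun b t => t.map (fun c => acc * a * b * c)) s)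

theorem phi_3_x_alt_eq_segments (x : List Int) :
    phi_3_x_alt x = 1 :: (x ++
      (sufRec (fun a s => s.map (fun c => a * c)) x ++
        sufRec (fun a s => sufRec (fun b t => t.map (fun c => a * b * c)) s) x)) := by
  unfold phi_3_x_alt
  simp only [List.foldl_cons, List.foldl_nil, emit_one, emit_two, emit_three, List.drop_zero]
  rw [show (x.map (fun c => (1 : Int) * c)) = x by simp,
    sufRec_congr (fun b t => t.map (fun c => 1 * b * c)) (fun a s => s.map (fun c => a * c))
      (fun a s => by simp),
    sufRec_congr _ (fun a s => sufRec (fun b t => t.map (fun c => a * b * c)) s)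
      (fun a s => sufRec_congr _ _ (fun b t => by simp) s)]
  simp [List.append_assoc]

-- ===== VERDICT (by name: the statement is the Claim_ definition above) =====
theorem phi_3_x_spec : Claim_equal_phi_3_x := by
  intro x _
  unfold Spec_phi_3_x
  rw [phi_3_x_eq_segments, phi_3_x_alt_eq_segments, pairs_eq, triples_eq]
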